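-- pv_equiv track=rewrite | github.com/paiml/depyler | examples/hard_prac_mem_slab.py | slab_alloc_n
-- ===== SOURCE A (Python) =====
-- def slab_alloc(free_bitmap: list[int], slab_capacity: int) -> int:
--     """Allocate one object from slab. Returns slot index or -1."""
--     i: int = 0
--     while i < slab_capacity:
--         f: int = free_bitmap[i]
--         if f == 0:
--             free_bitmap[i] = 1
--             return i
--         i = i + 1
--     return 0 - 1
--
-- def slab_alloc_n(free_bitmap: list[int], slab_capacity: int,
--                  n: int, result: list[int]) -> int:
--     """Allocate n objects. Store slots in result. Returns count allocated."""
--     allocated: int = 0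
--     while allocated < n:
--         slot: int = slab_alloc(free_bitmap, slab_capacity)
--         if slot < 0:
--             return allocated
--         result[allocated] = slot
--         allocated = allocated + 1
--     return allocated
-- ===== SOURCE B (Python) =====
-- def slab_alloc_n(free_bitmap, slab_capacity, n, result):
--     """Allocate n objects. Store slots in result. Returns count allocated.
--
--     Single advancing cursor over the bitmap (one pass) instead of restarting
--     a full scan from index 0 for every allocation. Performs the same in-place
--     mutations of free_bitmap and result as the original.
--     """
--     allocated = 0
--     i = 0
--     while allocated < n and i < slab_capacity:
--         if free_bitmap[i] == 0:
--             free_bitmap[i] = 1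
--             result[allocated] = i
--             allocated += 1
--         i += 1
--     return allocated
-- ===== Notes on version B (the rewrite author's own statement) =====
-- stated objective: simpler
-- what changed: B replaces A's helper-based repeated rescan (slab_alloc restarts at index 0 for every allocation) by one self-contained loop with a single advancing cursor over the bitmap.
import Mathlib
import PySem

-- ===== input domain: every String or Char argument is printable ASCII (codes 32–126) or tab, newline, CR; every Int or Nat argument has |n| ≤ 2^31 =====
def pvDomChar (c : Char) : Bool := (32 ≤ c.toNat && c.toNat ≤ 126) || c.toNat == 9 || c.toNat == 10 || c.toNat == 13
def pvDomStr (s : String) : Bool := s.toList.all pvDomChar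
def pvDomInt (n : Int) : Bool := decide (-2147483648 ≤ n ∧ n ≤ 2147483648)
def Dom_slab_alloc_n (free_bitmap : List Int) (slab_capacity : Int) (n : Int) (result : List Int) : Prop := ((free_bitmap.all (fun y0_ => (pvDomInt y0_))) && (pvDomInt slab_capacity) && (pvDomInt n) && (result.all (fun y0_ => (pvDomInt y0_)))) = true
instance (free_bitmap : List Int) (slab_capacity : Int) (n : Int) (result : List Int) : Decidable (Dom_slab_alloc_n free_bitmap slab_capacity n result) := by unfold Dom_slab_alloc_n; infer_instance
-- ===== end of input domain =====

-- B replaces A's per-allocation full rescan of the bitmap by a single advancing cursor (one pass);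
-- both Pythons mutate free_bitmap/result identically, the theorems are about the return value.


-- ===== PORT A =====
-- slab_alloc's while loop, fuel = (slab_capacity - i).toNat; none = IndexError on free_bitmap[i]
def slabAllocGo (free_bitmap : List Int) (slab_capacity i : Int) : Nat → Option (Int × List Int)
  | 0 => some (-1, free_bitmap)
  | fuel + 1 =>
    match PySem.List.pyGet? free_bitmap i with
    | none => none
    | some f =>
      if f = 0 then some (i, free_bitmap.set i.toNat 1)
      else slabAllocGo free_bitmap slab_capacity (i + 1) fuel

def slabAlloc (free_bitmap : List Int) (slab_capacity : Int) : Option (Int × List Int) :=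
  slabAllocGo free_bitmap slab_capacity 0 slab_capacity.toNat

-- slab_alloc_n's while loop, fuel = (n - allocated).toNat; -3 marks the raise paths
-- (IndexError inside slab_alloc, or result[allocated] out of range), both excluded by Pre_
def slabAllocNGo (free_bitmap : List Int) (slab_capacity n : Int) (result : List Int) (allocated : Int) : Nat → Int
  | 0 => allocated
  | fuel + 1 =>
    match slabAlloc free_bitmap slab_capacity with
    | none => -3
    | some p =>
      if p.1 < 0 then allocated
      else if allocated.toNat < result.length then
        slabAllocNGo p.2 slab_capacity n (result.set allocated.toNat p.1) (allocated + 1) fuel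
      else -3

def slab_alloc_n (free_bitmap : List Int) (slab_capacity : Int) (n : Int) (result : List Int) : Int :=
  slabAllocNGo free_bitmap slab_capacity n result 0 n.toNat

-- ===== PORT B =====
-- single cursor i over the bitmap, fuel = (slab_capacity - i).toNat; -3 marks the raise paths
def altGo (free_bitmap : List Int) (slab_capacity n : Int) (result : List Int) (allocated i : Int) : Nat → Int
  | 0 => allocated
  | fuel + 1 =>
    if allocated < n then
      match PySem.List.pyGet? free_bitmap i with
      | none => -3
      | some f =>
        if f = 0 then
          if allocated.toNat < result.length then
            altGo (free_bitmap.set i.toNat 1) slab_capacity n (result.set allocated.toNat i)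
              (allocated + 1) (i + 1) fuel
          else -3
        else altGo free_bitmap slab_capacity n result allocated (i + 1) fuel
    else allocated

def slab_alloc_n_alt (free_bitmap : List Int) (slab_capacity : Int) (n : Int) (result : List Int) : Int :=
  altGo free_bitmap slab_capacity n result 0 0 slab_capacity.toNat

-- ===== PRECONDITION & SPEC =====
-- zeros available among the slots A's scans can reach
def pvZeros (free_bitmap : List Int) (slab_capacity : Int) : Nat :=
  (free_bitmap.take slab_capacity.toNat).countP (fun x => x == 0)

-- Pre_ = exactly the inputs where Python A returns normally: it raises IndexError iff it must
-- write more slots than result holds, or must run a full failing scan past the end of a bitmap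
-- shorter than slab_capacity.
def Pre_slab_alloc_n (free_bitmap : List Int) (slab_capacity : Int) (n : Int) (result : List Int) : Prop :=
  min n.toNat (pvZeros free_bitmap slab_capacity) ≤ result.length ∧
  (pvZeros free_bitmap slab_capacity < n.toNat → slab_capacity ≤ free_bitmap.length)

instance (free_bitmap : List Int) (slab_capacity : Int) (n : Int) (result : List Int) : Decidable (Pre_slab_alloc_n free_bitmap slab_capacity n result) := by unfold Pre_slab_alloc_n; infer_instance

def pvWitness_slab_alloc_n : List Int × Int × Int × List Int := ([0, 1, 0], 3, 2, [0, 0])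

def Spec_slab_alloc_n (free_bitmap : List Int) (slab_capacity : Int) (n : Int) (result : List Int) (out : Int) : Prop := out = slab_alloc_n_alt free_bitmap slab_capacity n result
instance (free_bitmap : List Int) (slab_capacity : Int) (n : Int) (result : List Int) (out : Int) : Decidable (Spec_slab_alloc_n free_bitmap slab_capacity n result out) := by unfold Spec_slab_alloc_n; infer_instance

-- ===== CLAIM (what is proved, stated in full; the proofs are below) =====
def Claim_equal_slab_alloc_n : Prop := ∀ (free_bitmap : List Int) (slab_capacity : Int) (n : Int) (result : List Int), Dom_slab_alloc_n free_bitmap slab_capacity n result → Pre_slab_alloc_n free_bitmap slab_capacity n result → Spec_slab_alloc_n free_bitmap slab_capacity n result (slab_alloc_n free_bitmap slab_capacity n result)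

-- ===== LEMMAS AND PROOFS =====

-- zeros in the bitmap segment [i, i+fuel)
def segZ (bm : List Int) (i fuel : Nat) : Nat := ((bm.drop i).take fuel).countP (fun x => x == 0)

-- a successful read is in range
lemma pyGet_lt {bm : List Int} {i v : Int} (h0 : 0 ≤ i)
    (hv : PySem.List.pyGet? bm i = some v) : i.toNat < bm.length := by
  by_contra h
  have hn : PySem.List.pyGet? bm i = none :=
    (PySem.List.pyGet?_eq_none_iff bm i).mpr (by simp [PySem.Raise.InRange]; omega)
  rw [hn] at hv; simp at hv

lemma pyGet_elem {bm : List Int} {i v : Int} (h0 : 0 ≤ i)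
    (hv : PySem.List.pyGet? bm i = some v) : bm[i.toNat]'(pyGet_lt h0 hv) = v := by
  have h1 := pyGet_lt h0 hv
  rw [PySem.List.pyGet?_eq_some_getElem bm h0 (by omega)] at hv
  exact Option.some_injective _ hv

-- writing above a drop point is invisible
lemma drop_set_high (bm : List Int) (j : Nat) (v : Int) (k : Nat) (h : j < k) :
    (bm.set j v).drop k = bm.drop k := by
  apply List.ext_getElem
  · simp
  · intro m h1 h2
    simp only [List.getElem_drop]
    rw [List.getElem_set_ne (by omega)]

-- A's inner scan finds no slot when every entry below slab_capacity is nonzero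
lemma scan_none : ∀ (fuel : Nat) (bm : List Int) (cap i : Int),
    0 ≤ i → i + (fuel : Int) = cap →
    (∀ k : Int, 0 ≤ k → k < cap → ∃ v, PySem.List.pyGet? bm k = some v ∧ v ≠ 0) →
    slabAllocGo bm cap i fuel = some (-1, bm) := by
  intro fuel
  induction fuel with
  | zero => intro bm cap i h0 hcap hall; rfl
  | succ m ih =>
    intro bm cap i h0 hcap hall
    obtain ⟨v, hv, hv0⟩ := hall i h0 (by omega)
    simp [slabAllocGo, hv, hv0]
    exact ih bm cap (i + 1) (by omega) (by push_cast at hcap ⊢; omega) hall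

-- A's inner scan finds the first zero slot j
lemma scan_found : ∀ (fuel : Nat) (bm : List Int) (cap i j : Int),
    0 ≤ i → i + (fuel : Int) = cap → i ≤ j → j < cap →
    (∀ k : Int, i ≤ k → k < j → ∃ v, PySem.List.pyGet? bm k = some v ∧ v ≠ 0) →
    PySem.List.pyGet? bm j = some 0 →
    slabAllocGo bm cap i fuel = some (j, bm.set j.toNat 1) := by
  intro fuel
  induction fuel with
  | zero => intro bm cap i j h0 hcap hij hj _ _; omega
  | succ m ih =>
    intro bm cap i j h0 hcap hij hjc hpre hj
    by_cases hij' : i = j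
    · subst hij'; simp [slabAllocGo, hj]
    · obtain ⟨v, hv, hv0⟩ := hpre i le_rfl (by omega)
      simp [slabAllocGo, hv, hv0]
      exact ih bm cap (i + 1) j (by omega) (by push_cast at hcap ⊢; omega)
        (by omega) hjc (fun k hk hk' => hpre k (by omega) hk') hj

-- the cursor loop of B simulated against A's outer loop, under the invariant that
-- every slot strictly below the cursor is present and nonzero
lemma main_sim : ∀ (fuelB : Nat) (bm : List Int) (cap n : Int) (res : List Int) (allocated i : Int),
    0 ≤ i → i + (fuelB : Int) = cap → 0 ≤ allocated →
    (∀ k : Nat, k < i.toNat → ∃ h : k < bm.length, bm[k] ≠ 0) →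
    allocated.toNat + min (n - allocated).toNat (segZ bm i.toNat fuelB) ≤ res.length →
    (segZ bm i.toNat fuelB < (n - allocated).toNat → cap ≤ (bm.length : Int)) →
    slabAllocNGo bm cap n res allocated (n - allocated).toNat = altGo bm cap n res allocated i fuelB := by
  intro fuelB
  induction fuelB with
  | zero =>
    intro bm cap n res allocated i h0 hcap ha hpre hroom hrange
    show slabAllocNGo bm cap n res allocated (n - allocated).toNat = allocated
    rcases hN : (n - allocated).toNat with _ | m
    · rfl
    · have hscan : slabAlloc bm cap = some (-1, bm) := by
        refine scan_none cap.toNat bm cap 0 le_rfl (by omega) ?_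
        intro k hk hk'
        obtain ⟨h, hne⟩ := hpre k.toNat (by omega)
        exact ⟨bm[k.toNat], PySem.List.pyGet?_eq_some_getElem bm hk (by omega), hne⟩
      simp [slabAllocNGo, hscan]
  | succ m ih =>
    intro bm cap n res allocated i h0 hcap ha hpre hroom hrange
    by_cases han : allocated < n
    · have hN : (n - allocated).toNat = (n - (allocated + 1)).toNat + 1 := by omega
      -- prefix facts bridged to pyGet? form, for the scan lemmas
      have hpreG : ∀ k : Int, 0 ≤ k → k < i →
          ∃ v, PySem.List.pyGet? bm k = some v ∧ v ≠ 0 := by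
        intro k hk hki
        obtain ⟨h, hne⟩ := hpre k.toNat (by omega)
        exact ⟨bm[k.toNat], PySem.List.pyGet?_eq_some_getElem bm hk (by omega), hne⟩
      rcases hv : PySem.List.pyGet? bm i with _ | v
      · -- IndexError on free_bitmap[i]: excluded by the range clause of the invariant
        exfalso
        have hlen : (bm.length : Int) ≤ i := by
          have := (PySem.List.pyGet?_eq_none_iff bm i).mp hv
          simp [PySem.Raise.InRange] at this
          omega
        have hseg : segZ bm i.toNat (m + 1) = 0 := by
          have hnil : bm.drop i.toNat = [] := by
            apply List.drop_eq_nil_of_le; omega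
          simp [segZ, hnil]
        have := hrange (by omega)
        omega
      · have hiL : i.toNat < bm.length := pyGet_lt h0 hv
        have hgi : bm[i.toNat] = v := pyGet_elem h0 hv
        have hdrop : bm.drop i.toNat = v :: bm.drop (i.toNat + 1) := by
          rw [← List.getElem_cons_drop hiL, hgi]
        by_cases hv0 : v = 0
        · -- the cursor sits on a free slot: both sides allocate it
          subst hv0
          have hsegsplit : segZ bm i.toNat (m + 1) = segZ bm (i.toNat + 1) m + 1 := by
            simp [segZ, hdrop]
          have hroom' : allocated.toNat +
              (min (n - (allocated + 1)).toNat (segZ bm (i.toNat + 1) m) + 1) ≤ res.length := by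
            rw [hN, hsegsplit, Nat.succ_min_succ] at hroom
            exact hroom
          have hres : allocated.toNat < res.length := by omega
          have hsz : segZ (bm.set i.toNat 1) (i + 1).toNat m = segZ bm (i.toNat + 1) m := by
            have hd : (bm.set i.toNat 1).drop (i.toNat + 1) = bm.drop (i.toNat + 1) :=
              drop_set_high bm i.toNat 1 (i.toNat + 1) (by omega)
            have he : (i + 1).toNat = i.toNat + 1 := by omega
            simp only [segZ, he, hd]
          have hB : altGo bm cap n res allocated i (m + 1) =
              altGo (bm.set i.toNat 1) cap n (res.set allocated.toNat i) (allocated + 1) (i + 1) m := by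
            simp [altGo, han, hv, hres]
          have hscan : slabAlloc bm cap = some (i, bm.set i.toNat 1) := by
            refine scan_found cap.toNat bm cap 0 i le_rfl (by omega) h0 (by omega) ?_ hv
            intro k hk hk'
            exact hpreG k hk hk'
          have hA : slabAllocNGo bm cap n res allocated ((n - (allocated + 1)).toNat + 1) =
              slabAllocNGo (bm.set i.toNat 1) cap n (res.set allocated.toNat i) (allocated + 1)
                (n - (allocated + 1)).toNat := by
            simp [slabAllocNGo, hscan, hres, not_lt.mpr h0]
          rw [hB, hN, hA]
          apply ih
          · omega
          · push_cast at hcap ⊢; omega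
          · omega
          · intro k hk
            have hk' : k < i.toNat + 1 := by omega
            by_cases hki : k = i.toNat
            · subst hki
              refine ⟨by simpa using hiL, ?_⟩
              rw [List.getElem_set_self]
              decide
            · obtain ⟨h, hne⟩ := hpre k (by omega)
              refine ⟨by simpa using h, ?_⟩
              rw [List.getElem_set_ne (by omega)]
              exact hne
          · rw [hsz, List.length_set]
            omega
          · rw [hsz]
            intro hlt
            have := hrange (by omega)
            simpa using this
        · -- the cursor sits on a used slot: B skips it, A's state is untouched
          have hB : altGo bm cap n res allocated i (m + 1) =
              altGo bm cap n res allocated (i + 1) m := by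
            simp [altGo, han, hv, hv0]
          rw [hB]
          have hseg : segZ bm i.toNat (m + 1) = segZ bm (i.toNat + 1) m := by
            simp [segZ, hdrop, hv0]
          have hcast : segZ bm (i + 1).toNat m = segZ bm (i.toNat + 1) m := by
            have he : (i + 1).toNat = i.toNat + 1 := by omega
            simp only [segZ, he]
          apply ih
          · omega
          · push_cast at hcap ⊢; omega
          · exact ha
          · intro k hk
            by_cases hki : k = i.toNat
            · subst hki; exact ⟨hiL, by rw [hgi]; exact hv0⟩
            · exact hpre k (by omega)
          · rw [hcast, ← hseg]; exact hroom
          · rw [hcast, ← hseg]; exact hrange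
    · -- allocation target reached: both loops stop
      have hN : (n - allocated).toNat = 0 := by omega
      rw [hN]
      simp [altGo, han, slabAllocNGo]

-- ===== VERDICT (by name: the statement is the Claim_ definition above) =====
theorem slab_alloc_n_spec : Claim_equal_slab_alloc_n := by
  intro bm cap n res _ hpre
  show slab_alloc_n bm cap n res = slab_alloc_n_alt bm cap n res
  obtain ⟨hroom, hrange⟩ := hpre
  unfold slab_alloc_n slab_alloc_n_alt
  by_cases hc : 0 ≤ cap
  · have hfuel : (0 : Int) + (cap.toNat : Int) = cap := by omega
    have hseg : segZ bm (0 : Int).toNat cap.toNat = pvZeros bm cap := by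
      simp [segZ, pvZeros]
    have := main_sim cap.toNat bm cap n res 0 0 le_rfl hfuel le_rfl
      (fun k hk => absurd hk (by omega))
      (by rw [hseg]; simpa using hroom)
      (by rw [hseg]; simpa using hrange)
    simpa using this
  · -- slab_capacity < 0: both loops allocate nothing
    have hcz : cap.toNat = 0 := by omega
    rw [hcz]
    rcases hN : n.toNat with _ | m
    · rfl
    · simp [slabAllocNGo, slabAlloc, hcz, slabAllocGo, altGo]
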